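-- pv_equiv track=rewrite | github.com/flamearrow/toy | bsearch/bsearch.py | binary_search_by_first
-- ===== SOURCE A (Python) =====
-- def binary_search_by_first(pairs, target):
--     left, right = 0, len(pairs) - 1
--     while left <= right:
--         mid = (left + right) // 2
--         if pairs[mid][0] == target[0]:
--             return mid  # Found the target
--         elif pairs[mid][0] < target[0]:
--             left = mid + 1
--         else:
--             right = mid - 1
--     return -1  # Target not found
-- ===== SOURCE B (Python) =====
-- def binary_search_by_first(pairs, target):
--     def rec(sub, offset):
--         if not sub:
--             return -1
--         m = (len(sub) - 1) // 2
--         first = sub[m][0]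
--         if first == target[0]:
--             return offset + m
--         elif first < target[0]:
--             return rec(sub[m + 1:], offset + m + 1)
--         else:
--             return rec(sub[:m], offset)
--     return rec(pairs, 0)
-- ===== Notes on version B (the rewrite author's own statement) =====
-- stated objective: alternative
-- what changed: The iterative two-pointer while loop is replaced by a recursive helper that searches a sublist slice carrying an index offset, recursing on pairs[m+1:] or pairs[:m]; same probe sequence and returned index, different decomposition (recursion on slices instead of index bookkeeping).
import Mathlib
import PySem

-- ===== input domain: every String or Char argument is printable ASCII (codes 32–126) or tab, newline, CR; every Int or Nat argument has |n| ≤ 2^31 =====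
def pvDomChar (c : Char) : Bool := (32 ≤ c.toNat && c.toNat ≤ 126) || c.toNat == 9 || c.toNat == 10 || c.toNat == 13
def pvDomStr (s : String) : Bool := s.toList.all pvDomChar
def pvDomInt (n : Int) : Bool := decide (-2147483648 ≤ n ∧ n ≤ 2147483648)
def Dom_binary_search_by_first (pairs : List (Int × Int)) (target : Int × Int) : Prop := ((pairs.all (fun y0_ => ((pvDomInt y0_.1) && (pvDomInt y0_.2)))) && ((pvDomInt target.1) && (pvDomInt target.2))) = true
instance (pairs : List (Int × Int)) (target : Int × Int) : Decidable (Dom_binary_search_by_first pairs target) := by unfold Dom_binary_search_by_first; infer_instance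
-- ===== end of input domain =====

-- B re-implements the binary search as a recursive helper on list slices with an index
-- offset instead of A's iterative left/right index loop; same value everywhere (alternative decomposition, no speed claim).

-- ===== PORT A =====
-- the while loop of A as recursion over (left, right); pairs[mid] is always in range on
-- reachable states, so the getD default (0,0) is dead code
def bsLoop (pairs : List (Int × Int)) (t0 left right : Int) : Int :=
  if h : left ≤ right then
    let mid := PySem.Int.floordiv (left + right) 2
    let v := ((PySem.List.pyGet? pairs mid).getD (0, 0)).1
    if v = t0 then mid
    else if v < t0 then bsLoop pairs t0 (mid + 1) right
    else bsLoop pairs t0 left (mid - 1)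
  else -1
termination_by (right + 1 - left).toNat
decreasing_by
  all_goals
    have := PySem.Int.floordiv_two_mid_bounds (lo := left) (hi := right) h
    omega

def binary_search_by_first (pairs : List (Int × Int)) (target : Int × Int) : Int :=
  bsLoop pairs target.1 0 ((pairs.length : Int) - 1)

-- ===== PORT B =====
-- B's rec(sub, offset): empty → -1, probe the middle, recurse on sub[m+1:] or sub[:m]
def bsRec (sub : List (Int × Int)) (t0 offset : Int) : Int :=
  if hne : sub = [] then -1
  else
    let m : Nat := (sub.length - 1) / 2
    let v := ((PySem.List.pyGet? sub (m : Int)).getD (0, 0)).1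
    if v = t0 then offset + m
    else if v < t0 then bsRec (PySem.List.slice sub (some ((m : Int) + 1)) none) t0 (offset + m + 1)
    else bsRec (PySem.List.slice sub none (some (m : Int))) t0 offset
termination_by sub.length
decreasing_by
  · have h1 : ((sub.length - 1) / 2 : Nat) < sub.length := by
      have : sub.length ≠ 0 := by simpa [List.length_eq_zero_iff] using hne
      omega
    have : ((((sub.length - 1) / 2 : Nat) : Int) + 1) = ((((sub.length - 1) / 2 + 1 : Nat)) : Int) := by push_cast; ring
    rw [this, PySem.List.slice_from_natCast]
    simp only [List.length_drop]
    omega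
  · have : sub.length ≠ 0 := by simpa [List.length_eq_zero_iff] using hne
    rw [PySem.List.slice_to_natCast]
    simp only [List.length_take]
    omega

def binary_search_by_first_alt (pairs : List (Int × Int)) (target : Int × Int) : Int :=
  bsRec pairs target.1 0

-- ===== PRECONDITION & SPEC =====
def Spec_binary_search_by_first (pairs : List (Int × Int)) (target : Int × Int) (out : Int) : Prop := out = binary_search_by_first_alt pairs target
instance (pairs : List (Int × Int)) (target : Int × Int) (out : Int) : Decidable (Spec_binary_search_by_first pairs target out) := by unfold Spec_binary_search_by_first; infer_instance

-- ===== CLAIM (what is proved, stated in full; the proofs are below) =====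
def Claim_equal_binary_search_by_first : Prop := ∀ (pairs : List (Int × Int)) (target : Int × Int), Dom_binary_search_by_first pairs target → Spec_binary_search_by_first pairs target (binary_search_by_first pairs target)

-- ===== LEMMAS AND PROOFS =====

theorem bsLoop_eq_bsRec (w : Nat) (pairs : List (Int × Int)) (t0 : Int) :
    ∀ (lo : Nat), lo + w ≤ pairs.length →
      bsLoop pairs t0 (lo : Int) ((lo : Int) + (w : Int) - 1)
        = bsRec ((pairs.drop lo).take w) t0 (lo : Int) := by
  induction w using Nat.strong_induction_on with
  | _ w ih =>
    intro lo hlw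
    rcases Nat.eq_zero_or_pos w with hw | hw
    · subst hw
      rw [bsLoop, bsRec]
      simp
    · -- window nonempty
      have hlen : ((pairs.drop lo).take w).length = w := by
        simp only [List.length_take, List.length_drop]; omega
      have hne : (pairs.drop lo).take w ≠ [] := by
        intro h; rw [h] at hlen; simp at hlen; omega
      set m : Nat := (w - 1) / 2 with hm
      have hmw : m < w := by omega
      have hmid : PySem.Int.floordiv ((lo : Int) + ((lo : Int) + (w : Int) - 1)) 2
          = (lo : Int) + (m : Int) := by
        rw [PySem.Int.floordiv_eq_ediv_of_pos (by omega)]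
        omega
      have hidx : lo + m < pairs.length := by omega
      have hgetA : PySem.List.pyGet? pairs ((lo : Int) + (m : Int)) = some pairs[lo + m] := by
        have : ((lo : Int) + (m : Int)) = ((lo + m : Nat) : Int) := by push_cast; ring
        rw [this, PySem.List.pyGet?_natCast]
        simp [hidx]
      have hgetB : PySem.List.pyGet? ((pairs.drop lo).take w) ((m : Int)) = some pairs[lo + m] := by
        rw [PySem.List.pyGet?_natCast]
        rw [List.getElem?_take_of_lt (by omega), List.getElem?_drop]
        simp [hidx]
      have hmB : (((pairs.drop lo).take w).length - 1) / 2 = m := by rw [hlen]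
      rw [bsLoop, bsRec]
      rw [dif_pos (by omega : (lo : Int) ≤ (lo : Int) + (w : Int) - 1), dif_neg hne]
      simp only [hmid, hmB, hgetA, hgetB, Option.getD_some]
      by_cases h1 : pairs[lo + m].1 = t0
      · simp [h1]
      · by_cases h2 : pairs[lo + m].1 < t0
        · simp only [h1, h2, if_false, if_true]
          -- left = lo + m + 1 branch
          have hcast : ((m : Int) + 1) = ((m + 1 : Nat) : Int) := by push_cast; ring
          rw [hcast, PySem.List.slice_from_natCast, List.drop_take, List.drop_drop]
          have e1 : (lo : Int) + (m : Int) + 1 = ((lo + m + 1 : Nat) : Int) := by push_cast; ring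
          have e2 : (lo : Int) + (w : Int) - 1 = ((lo + m + 1 : Nat) : Int) + ((w - (m + 1) : Nat) : Int) - 1 := by
            push_cast [Nat.cast_sub (by omega : m + 1 ≤ w)]; ring
          rw [e1, e2, ih (w - (m + 1)) (by omega) (lo + m + 1) (by omega),
            show lo + (m + 1) = lo + m + 1 from by omega]
        · simp only [h1, h2, if_false]
          -- right = lo + m - 1 branch
          rw [PySem.List.slice_to_natCast, List.take_take]
          rw [show min m w = m by omega]
          exact ih m (by omega) lo (by omega)

-- ===== VERDICT (by name: the statement is the Claim_ definition above) =====
theorem binary_search_by_first_spec : Claim_equal_binary_search_by_first := by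
  intro pairs target _
  unfold Spec_binary_search_by_first binary_search_by_first binary_search_by_first_alt
  have := bsLoop_eq_bsRec pairs.length pairs target.1 0 (by omega)
  simpa using this
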